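-- pv_equiv track=rewrite | github.com/Tesla2000/Checkers | checkers/Board.py | filter_by_longest_size
-- ===== SOURCE A (Python) =====
-- from collections.abc import Mapping
-- from collections.abc import Sized
-- from typing import Any
--
-- def filter_by_longest_size(dict: Mapping[Any, Sized]):
--     if not all(map(lambda x: len(x) == 0, dict.values())):
--         size = max(len(x) for x in dict.values())
--         result = {}
--         for (key, value) in dict.items():
--             if len(value) == size:
--                 result.update({key: value})
--         return result
--     else:
--         return dict
-- ===== SOURCE B (Python) =====
-- def filter_by_longest_size(dict):
--     best = -1
--     result = {}
--     for key, value in dict.items():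
--         L = len(value)
--         if best < L:
--             best = L
--             result = {key: value}
--         elif L == best:
--             result[key] = value
--     if best <= 0:
--         return dict
--     return result
-- ===== Notes on version B (the rewrite author's own statement) =====
-- stated objective: faster
-- what changed: Replaces A's three passes (all-zero check, max of lengths, filtering loop) by a single grouping pass that tracks the best length and the current group, resetting the group when a longer value appears.
import Mathlib
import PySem

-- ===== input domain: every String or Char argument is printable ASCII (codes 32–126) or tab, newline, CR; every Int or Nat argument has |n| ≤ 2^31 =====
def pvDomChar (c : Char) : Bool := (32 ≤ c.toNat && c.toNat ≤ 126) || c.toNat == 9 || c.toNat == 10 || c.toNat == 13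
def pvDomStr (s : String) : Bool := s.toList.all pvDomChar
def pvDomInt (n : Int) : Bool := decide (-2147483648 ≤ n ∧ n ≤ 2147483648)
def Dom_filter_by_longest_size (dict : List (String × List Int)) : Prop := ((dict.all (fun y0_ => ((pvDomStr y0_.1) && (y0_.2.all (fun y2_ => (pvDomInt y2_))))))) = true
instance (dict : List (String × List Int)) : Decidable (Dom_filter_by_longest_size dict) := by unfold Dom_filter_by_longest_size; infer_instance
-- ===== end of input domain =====

-- B replaces A's three passes (all-zero check, max of lengths, filtering loop) by one grouping pass; same cost class.

-- ===== PORT A =====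
def filter_by_longest_size (dict : List (String × List Int)) : List (String × List Int) :=
  if !((dict.map Prod.snd).all (fun x => x.length == 0)) then
    -- size = max(len(x) for x in dict.values()); the `.getD 0` is unreachable:
    -- this branch implies dict ≠ [], so max? = some (Python's max raises only on an empty iterable)
    let size : Int := (PySem.List.max? (dict.map (fun x => ((x.2.length : Int)))) (fun y => y)).getD 0
    (dict.foldl
      (fun (result : PySem.Dict String (List Int)) kv =>
        if ((kv.2.length : Int) == size) then result.insert kv.1 kv.2 else result)
      PySem.Dict.empty).items
  else dict

-- ===== PORT B =====
-- loop body of B's single pass (named so the invariant lemma below can talk about it)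
def pvStepB (st : Int × PySem.Dict String (List Int)) (kv : String × List Int) :
    Int × PySem.Dict String (List Int) :=
  let L : Int := kv.2.length
  if st.1 < L then (L, PySem.Dict.empty.insert kv.1 kv.2)
  else if L == st.1 then (st.1, st.2.insert kv.1 kv.2)
  else st

def filter_by_longest_size_alt (dict : List (String × List Int)) : List (String × List Int) :=
  let st := dict.foldl pvStepB ((-1 : Int), PySem.Dict.empty)
  if st.1 ≤ 0 then dict else st.2.items

-- ===== PRECONDITION & SPEC =====
def Spec_filter_by_longest_size (dict : List (String × List Int)) (out : List (String × List Int)) : Prop := out = filter_by_longest_size_alt dict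
instance (dict : List (String × List Int)) (out : List (String × List Int)) : Decidable (Spec_filter_by_longest_size dict out) := by unfold Spec_filter_by_longest_size; infer_instance

-- ===== CLAIM (what is proved, stated in full; the proofs are below) =====
def Claim_equal_filter_by_longest_size : Prop := ∀ (dict : List (String × List Int)), Dom_filter_by_longest_size dict → Spec_filter_by_longest_size dict (filter_by_longest_size dict)

-- ===== LEMMAS AND PROOFS =====

-- running maximum of value-lengths starting from a
def pvM (a : Int) (l : List (String × List Int)) : Int :=
  l.foldl (fun m kv => max m ((kv.2.length : Int))) a

theorem pvM_nil (a : Int) : pvM a [] = a := rfl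

theorem pvM_cons (a : Int) (kv : String × List Int) (t : List (String × List Int)) :
    pvM a (kv :: t) = pvM (max a (kv.2.length : Int)) t := rfl

theorem le_pvM (a : Int) (l : List (String × List Int)) : a ≤ pvM a l := by
  induction l generalizing a with
  | nil => simp [pvM_nil]
  | cons kv t ih =>
    rw [pvM_cons]
    exact le_trans (le_max_left _ _) (ih _)

theorem pvM_le_iff (a c : Int) (l : List (String × List Int)) :
    pvM a l ≤ c ↔ a ≤ c ∧ ∀ kv ∈ l, (kv.2.length : Int) ≤ c := by
  induction l generalizing a with
  | nil => simp [pvM_nil]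
  | cons kv t ih =>
    rw [pvM_cons, ih]
    constructor
    · rintro ⟨h1, h2⟩
      refine ⟨le_trans (le_max_left _ _) h1, ?_⟩
      intro x hx
      rcases List.mem_cons.mp hx with rfl | hx
      · exact le_trans (le_max_right _ _) h1
      · exact h2 x hx
    · rintro ⟨h1, h2⟩
      exact ⟨max_le h1 (h2 kv (by simp)), fun x hx => h2 x (by simp [hx])⟩

-- the all-zero test of A is the statement pvM (-1) l ≤ 0
theorem allzero_iff (l : List (String × List Int)) :
    ((l.map Prod.snd).all (fun x => x.length == 0)) = true ↔ pvM (-1) l ≤ 0 := by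
  rw [pvM_le_iff]
  simp only [List.all_map, List.all_eq_true, Function.comp]
  constructor
  · intro h
    refine ⟨by omega, fun kv hkv => ?_⟩
    have := h kv hkv
    simp only [beq_iff_eq] at this
    omega
  · rintro ⟨-, h⟩ kv hkv
    have := h kv hkv
    simp only [beq_iff_eq]
    omega

-- A's size (max over the nonempty list of lengths) is pvM (-1) l
theorem size_eq_pvM (x : String × List Int) (t : List (String × List Int)) :
    (PySem.List.max? ((x :: t).map (fun p => ((p.2.length : Int)))) (fun y => y)).getD 0
      = pvM (-1) (x :: t) := by
  rw [List.map_cons, PySem.List.max?_id_cons, pvM_cons]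
  have h : max (-1 : Int) (x.2.length : Int) = (x.2.length : Int) := by
    have : (0 : Int) ≤ (x.2.length : Int) := Int.natCast_nonneg _
    omega
  rw [h]
  simp [pvM, List.foldl_map]

-- A's if-guarded insertion loop is a fold of insertions over the filtered list
theorem foldl_if_filter (s : Int) (l : List (String × List Int))
    (a : PySem.Dict String (List Int)) :
    l.foldl (fun result kv =>
        if ((kv.2.length : Int) == s) then result.insert kv.1 kv.2 else result) a
      = (l.filter (fun kv => ((kv.2.length : Int) == s))).foldl
          (fun d kv => d.insert kv.1 kv.2) a := by
  induction l generalizing a with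
  | nil => rfl
  | cons x t ih =>
    by_cases h : ((x.2.length : Int) == s) = true
    · simp only [List.foldl_cons, List.filter_cons, h, if_true]
      exact ih _
    · simp only [List.foldl_cons, List.filter_cons, h, Bool.false_eq_true, if_false]
      exact ih _

-- evaluation of B's loop body
theorem pvStepB_gt (b : Int) (r : PySem.Dict String (List Int)) (kv : String × List Int)
    (h : b < (kv.2.length : Int)) :
    pvStepB (b, r) kv = ((kv.2.length : Int), PySem.Dict.empty.insert kv.1 kv.2) := by
  simp [pvStepB, h]

theorem pvStepB_eq (b : Int) (r : PySem.Dict String (List Int)) (kv : String × List Int)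
    (h : b = (kv.2.length : Int)) :
    pvStepB (b, r) kv = (b, r.insert kv.1 kv.2) := by
  simp [pvStepB, ← h]

theorem pvStepB_lt (b : Int) (r : PySem.Dict String (List Int)) (kv : String × List Int)
    (h : (kv.2.length : Int) < b) :
    pvStepB (b, r) kv = (b, r) := by
  have h1 : ¬ b < (kv.2.length : Int) := by omega
  have h2 : ¬ ((kv.2.length : Int) == b) = true := by simp; omega
  simp [pvStepB, h1, h2]

-- invariant of B's single grouping pass
theorem B_inv (l : List (String × List Int)) (b : Int) (r : PySem.Dict String (List Int)) :
    l.foldl pvStepB (b, r)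
    = (pvM b l,
       if pvM b l = b then
         (l.filter (fun kv => ((kv.2.length : Int) == b))).foldl (fun d kv => d.insert kv.1 kv.2) r
       else
         (l.filter (fun kv => ((kv.2.length : Int) == pvM b l))).foldl
           (fun d kv => d.insert kv.1 kv.2) PySem.Dict.empty) := by
  induction l generalizing b r with
  | nil => simp [pvM_nil]
  | cons kv t ih =>
    rw [List.foldl_cons]
    rcases lt_trichotomy b ((kv.2.length : Int)) with hb | hb | hb
    · -- strictly longer value: new maximum, reset the group
      rw [pvStepB_gt b r kv hb, ih]
      have hmax : max b ((kv.2.length : Int)) = (kv.2.length : Int) := by omega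
      have hM : pvM b (kv :: t) = pvM ((kv.2.length : Int)) t := by rw [pvM_cons, hmax]
      have hle : (kv.2.length : Int) ≤ pvM ((kv.2.length : Int)) t := le_pvM _ _
      rw [hM, if_neg (by omega : ¬ pvM ((kv.2.length : Int)) t = b)]
      by_cases hm : pvM ((kv.2.length : Int)) t = (kv.2.length : Int)
      · rw [if_pos hm, hm, List.filter_cons, if_pos (by simp), List.foldl_cons]
      · rw [if_neg hm, List.filter_cons,
          if_neg (by simp; omega : ¬ ((kv.2.length : Int) == pvM ((kv.2.length : Int)) t) = true)]
    · -- same length as the current best: extend the group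
      rw [pvStepB_eq b r kv hb, ih]
      have hmax : max b ((kv.2.length : Int)) = b := by omega
      have hM : pvM b (kv :: t) = pvM b t := by rw [pvM_cons, hmax]
      have hle : b ≤ pvM b t := le_pvM _ _
      rw [hM]
      by_cases hm : pvM b t = b
      · rw [if_pos hm, if_pos hm, List.filter_cons, if_pos (by simp [hb]), List.foldl_cons]
      · rw [if_neg hm, if_neg hm, List.filter_cons,
          if_neg (by simp; omega : ¬ ((kv.2.length : Int) == pvM b t) = true)]
    · -- shorter value: skip
      rw [pvStepB_lt b r kv hb, ih]
      have hmax : max b ((kv.2.length : Int)) = b := by omega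
      have hM : pvM b (kv :: t) = pvM b t := by rw [pvM_cons, hmax]
      have hle : b ≤ pvM b t := le_pvM _ _
      rw [hM]
      by_cases hm : pvM b t = b
      · rw [if_pos hm, if_pos hm, List.filter_cons,
          if_neg (by simp; omega : ¬ ((kv.2.length : Int) == b) = true)]
      · rw [if_neg hm, if_neg hm, List.filter_cons,
          if_neg (by simp; omega : ¬ ((kv.2.length : Int) == pvM b t) = true)]

-- ===== VERDICT (by name: the statement is the Claim_ definition above) =====
theorem filter_by_longest_size_spec : Claim_equal_filter_by_longest_size := by
  intro dict _
  unfold Spec_filter_by_longest_size filter_by_longest_size filter_by_longest_size_alt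
  simp only [B_inv]
  by_cases hall : ((dict.map Prod.snd).all (fun x => x.length == 0)) = true
  · have hM : pvM (-1) dict ≤ 0 := (allzero_iff dict).mp hall
    rw [hall]
    simp only [Bool.not_true, Bool.false_eq_true, if_false]
    rw [if_pos hM]
  · have hM : ¬ pvM (-1) dict ≤ 0 := fun h => hall ((allzero_iff dict).mpr h)
    cases dict with
    | nil => exact absurd rfl hall
    | cons x t =>
      have hfalse : (((x :: t).map Prod.snd).all (fun v => v.length == 0)) = false := by
        cases h : (((x :: t).map Prod.snd).all (fun v => v.length == 0)) with
        | true => exact absurd h hall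
        | false => rfl
      have hcond : (!(((x :: t).map Prod.snd).all (fun v => v.length == 0))) = true := by
        rw [hfalse]; rfl
      rw [if_pos hcond, size_eq_pvM, foldl_if_filter,
        if_neg hM, if_neg (by omega : ¬ pvM (-1) (x :: t) = -1)]
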